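-- pv_equiv track=rewrite | github.com/diogomacedo/estudos-python | python-2/elefantes.py | elefantes
-- ===== SOURCE A (Python) =====
-- def incomodam(n):
--   if n > 1:
--     return incomodam(1) + incomodam(n-1)
--   elif n == 1:
--     return 'incomodam '
--   else:
--     return ''
--
-- def elefantes(n, x=2):
--   if n > 1 and n >= x:
--     result = ''
--     if x == 2:
--       result = 'Um elefante incomoda muita gente' + '\n' + str(x) + ' elefantes ' + incomodam(x) + 'muito mais' + '\n'
--     else:
--       temp = x-1
--       result = str(temp) + ' elefantes incomodam muita gente' +'\n' + str(x) + ' elefantes ' + incomodam(x) + 'muito mais' +'\n'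
--     return result + str(elefantes(n, x+1))
--   else:
--     return ''
-- ===== SOURCE B (Python) =====
-- def elefantes(n, x=2):
--     out = ''
--     k = x
--     while n > 1 and n >= k:
--         if k == 2:
--             out += 'Um elefante incomoda muita gente\n'
--         else:
--             out += str(k - 1) + ' elefantes incomodam muita gente\n'
--         out += str(k) + ' elefantes ' + 'incomodam ' * k + 'muito mais\n'
--         k += 1
--     return out
-- ===== Notes on version B (the rewrite author's own statement) =====
-- stated objective: simpler
-- what changed: Replaces the two recursions (one per verse, plus a character-doubling recursion for the repeated word) with a single iterative while loop that accumulates the song text, using plain string repetition for 'incomodam '.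
import Mathlib
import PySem

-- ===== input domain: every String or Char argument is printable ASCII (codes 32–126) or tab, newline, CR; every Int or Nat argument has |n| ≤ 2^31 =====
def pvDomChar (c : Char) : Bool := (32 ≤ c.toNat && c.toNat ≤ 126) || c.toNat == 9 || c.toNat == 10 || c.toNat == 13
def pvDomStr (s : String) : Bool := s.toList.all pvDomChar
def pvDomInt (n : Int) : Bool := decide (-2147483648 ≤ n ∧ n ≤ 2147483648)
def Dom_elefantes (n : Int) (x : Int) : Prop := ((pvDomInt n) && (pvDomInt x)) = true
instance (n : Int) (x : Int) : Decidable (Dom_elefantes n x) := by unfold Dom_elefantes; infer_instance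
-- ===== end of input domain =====

-- B replaces A's two recursions (per-verse recursion plus a recursive word-repeater) with one
-- iterative accumulator loop over the running elephant count; same output, simpler structure.


-- ===== PORT A =====
def incomodam (n : Int) : String :=
  if n > 1 then incomodam 1 ++ incomodam (n - 1)
  else if n == 1 then "incomodam "
  else ""
termination_by n.toNat
decreasing_by all_goals omega

def elefantes (n : Int) (x : Int) : String :=
  if _h : n > 1 ∧ n ≥ x then
    (if x == 2 then
      "Um elefante incomoda muita gente" ++ "\n" ++ PySem.Int.toStr x ++ " elefantes " ++
        incomodam x ++ "muito mais" ++ "\n"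
    else
      PySem.Int.toStr (x - 1) ++ " elefantes incomodam muita gente" ++ "\n" ++
        PySem.Int.toStr x ++ " elefantes " ++ incomodam x ++ "muito mais" ++ "\n")
    ++ elefantes n (x + 1)
  else ""
termination_by (n - x + 1).toNat
decreasing_by omega

-- ===== PORT B =====
-- 'incomodam ' * k  (Python string repetition, repeat count k.toNat)
def strRep (s : String) : Nat → String
  | 0 => ""
  | m + 1 => s ++ strRep s m

def elefantesLoop (n : Int) (k : Int) (out : String) : String :=
  if _h : n > 1 ∧ n ≥ k then
    elefantesLoop n (k + 1)
      ((out ++ (if k == 2 then "Um elefante incomoda muita gente\n"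
                else PySem.Int.toStr (k - 1) ++ " elefantes incomodam muita gente\n"))
        ++ (PySem.Int.toStr k ++ " elefantes " ++ strRep "incomodam " k.toNat ++ "muito mais\n"))
  else out
termination_by (n - k + 1).toNat
decreasing_by omega

def elefantes_alt (n : Int) (x : Int) : String := elefantesLoop n x ""

-- ===== PRECONDITION & SPEC =====
-- Pre_ excludes the deep-recursion inputs on which A raises RecursionError (its recursion depth is
-- about 2*n - x when the verses loop runs); the bound 4000 keeps a safety margin below the runner's
-- interpreter recursion limit, since the exact overflow point is environment-dependent.
def Pre_elefantes (n : Int) (x : Int) : Prop := ¬(n > 1 ∧ n ≥ x) ∨ 2 * n - x ≤ 4000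
instance (n : Int) (x : Int) : Decidable (Pre_elefantes n x) := by unfold Pre_elefantes; infer_instance
def pvWitness_elefantes : Int × Int := (4, 2)

def Spec_elefantes (n : Int) (x : Int) (out : String) : Prop := out = elefantes_alt n x
instance (n : Int) (x : Int) (out : String) : Decidable (Spec_elefantes n x out) := by unfold Spec_elefantes; infer_instance

-- ===== CLAIM (what is proved, stated in full; the proofs are below) =====
def Claim_equal_elefantes : Prop := ∀ (n : Int) (x : Int), Dom_elefantes n x → Pre_elefantes n x → Spec_elefantes n x (elefantes n x)

-- ===== LEMMAS AND PROOFS =====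
lemma incomodam_eq_strRep (m : Nat) : ∀ n : Int, n.toNat = m → incomodam n = strRep "incomodam " m := by
  induction m with
  | zero =>
    intro n hn
    rw [incomodam]
    have h1 : ¬ n > 1 := by omega
    have h2 : (n == 1) = false := by simp; omega
    simp [h1, h2, strRep]
  | succ m ih =>
    intro n hn
    rw [incomodam]
    by_cases h : n > 1
    · have h1 : incomodam 1 = "incomodam " := by rw [incomodam]; simp
      rw [if_pos h, h1, ih (n - 1) (by omega), strRep]
    · have hn1 : n = 1 := by omega
      simp [hn1, strRep]
      have : m = 0 := by omega
      simp [this, strRep]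

lemma elefantesLoop_eq (m : Nat) : ∀ (n k : Int) (out : String), (n - k + 1).toNat = m →
    elefantesLoop n k out = out ++ elefantes n k := by
  induction m with
  | zero =>
    intro n k out h
    rw [elefantesLoop, elefantes]
    by_cases hc : n > 1 ∧ n ≥ k
    · omega
    · simp [hc]
  | succ m ih =>
    intro n k out h
    rw [elefantesLoop, elefantes]
    by_cases hc : n > 1 ∧ n ≥ k
    · rw [dif_pos hc, dif_pos hc, ih n (k + 1) _ (by omega),
        incomodam_eq_strRep k.toNat k rfl]
      by_cases hk : k = 2
      · simp [hk, String.append_assoc]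
      · have hk' : (k == 2) = false := by simp [hk]
        simp [hk', String.append_assoc]
    · simp [hc]

-- ===== VERDICT (by name: the statement is the Claim_ definition above) =====
theorem elefantes_spec : Claim_equal_elefantes := by
  intro n x _ _
  show elefantes n x = elefantes_alt n x
  rw [elefantes_alt, elefantesLoop_eq (n - x + 1).toNat n x "" rfl]
  simp
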